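-- pv_equiv track=rewrite | github.com/cjpark1541/Practice_Programmers | Lv0/Lv0_세로 읽기.py | solution
-- ===== SOURCE A (Python) =====
-- def solution(my_string,m,c):
--     string_list=[]; wanted_string=''
--     for i in range(0,len(my_string),m):
--         new_string=my_string[int(i):int(i)+m]
--         string_list.append(new_string)
--     for j in string_list:
--         wanted_string=wanted_string+j[c-1]
--     return wanted_string
-- ===== SOURCE B (Python) =====
-- def solution(my_string, m, c):
--     # consume the string row by row: split the next row off the front,
--     # take its column; no index arithmetic, no list of all rows
--     if m <= 0:
--         # a non-positive row width yields no rows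
--         return ''
--     out = []
--     s = my_string
--     while s:
--         row, s = s[:m], s[m:]
--         out.append(row[c - 1])
--     return ''.join(out)
-- ===== Notes on version B (the rewrite author's own statement) =====
-- stated objective: alternative
-- what changed: B replaces A's two staged passes (an index-range loop materialising the full list of rows, then a second loop indexing each row) by a single while loop that destructively splits the next row off the front of the remaining string and reads its column, with no index arithmetic and no list of rows; it trades extra slice copying for index-free code.
import Mathlib
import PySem

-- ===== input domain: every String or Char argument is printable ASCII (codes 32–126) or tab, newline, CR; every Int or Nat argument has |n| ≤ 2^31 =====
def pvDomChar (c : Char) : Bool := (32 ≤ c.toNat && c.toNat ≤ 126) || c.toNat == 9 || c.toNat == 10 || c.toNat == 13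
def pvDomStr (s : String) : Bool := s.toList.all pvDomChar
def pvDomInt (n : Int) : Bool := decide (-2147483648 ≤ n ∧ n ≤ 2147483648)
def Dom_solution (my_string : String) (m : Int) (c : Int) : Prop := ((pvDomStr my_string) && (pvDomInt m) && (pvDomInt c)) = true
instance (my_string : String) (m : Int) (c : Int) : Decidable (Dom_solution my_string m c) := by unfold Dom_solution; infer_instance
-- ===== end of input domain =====

-- B consumes the string row by row with a single head/tail-splitting loop (no index
-- arithmetic, no intermediate list of all rows); equivalence is claimed for m ≠ 0.

-- ===== PORT A =====
def solution (my_string : String) (m : Int) (c : Int) : String :=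
  let s := my_string.toList
  let string_list : List (List Char) :=
    (PySem.List.pyRange 0 (s.length : Int) m).foldl
      (fun acc i => acc ++ [PySem.List.slice s (some i) (some (i + m))]) []
  let wanted : List Char :=
    string_list.foldl (fun acc j => acc ++ [PySem.List.pyGetD j (c - 1) ' ']) []
  String.ofList wanted

-- ===== PORT B =====
-- loop 'while s: row, s = s[:m], s[m:]; out.append(row[c-1])' as structural recursion
-- on the remaining string; for 0 < m s[:m] is take m.toNat and s[m:] is drop m.toNat (exact).
def altLoop (c : Int) (m : Int) (hm : 0 < m) : List Char → List Char
  | [] => []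
  | ch :: rest =>
      PySem.List.pyGetD ((ch :: rest).take m.toNat) (c - 1) ' '
        :: altLoop c m hm ((ch :: rest).drop m.toNat)
termination_by s => s.length
decreasing_by simp; omega

def solution_alt (my_string : String) (m : Int) (c : Int) : String :=
  if h : m ≤ 0 then ""
  else String.ofList (altLoop c m (by omega) my_string.toList)

-- ===== PRECONDITION & SPEC =====
-- Pre_ excludes exactly the inputs where A raises: m = 0 (ValueError from range) and, for
-- 0 < m on a nonempty string, a column c whose index c-1 falls outside some row — the
-- binding row is the last one, of length r = (len % m, or m when m divides len), so the
-- condition is 1 - r ≤ c ≤ r (Python indexing accepts exactly -rowlen ≤ c-1 < rowlen).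
def Pre_solution (my_string : String) (m : Int) (c : Int) : Prop :=
  m ≠ 0 ∧ (0 < m →
    ((my_string.toList.length : Int) = 0 ∨
     (1 - (if (my_string.toList.length : Int) % m = 0 then m
           else (my_string.toList.length : Int) % m) ≤ c ∧
      c ≤ (if (my_string.toList.length : Int) % m = 0 then m
           else (my_string.toList.length : Int) % m))))
instance (my_string : String) (m : Int) (c : Int) : Decidable (Pre_solution my_string m c) := by
  unfold Pre_solution; infer_instance
def pvWitness_solution : String × Int × Int := ("abcdef", 2, 2)

def Spec_solution (my_string : String) (m : Int) (c : Int) (out : String) : Prop := out = solution_alt my_string m c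
instance (my_string : String) (m : Int) (c : Int) (out : String) : Decidable (Spec_solution my_string m c out) := by unfold Spec_solution; infer_instance

-- ===== CLAIM (what is proved, stated in full; the proofs are below) =====
def Claim_equal_solution : Prop := ∀ (my_string : String) (m : Int) (c : Int), Dom_solution my_string m c → Pre_solution my_string m c → Spec_solution my_string m c (solution my_string m c)

-- ===== LEMMAS AND PROOFS =====

-- A's foldl-with-append loops are maps
theorem pv_foldl_app {α β : Type} (f : α → β) :
    ∀ (xs : List α) (acc : List β),
      xs.foldl (fun a x => a ++ [f x]) acc = acc ++ xs.map f := by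
  intro xs
  induction xs with
  | nil => simp
  | cons x xs ih => intro acc; simp [List.foldl_cons, ih]

-- peel the first row start off a positive-step range from 0
theorem pv_pyRange_cons_shift (m L : Int) (hm : 0 < m) (hL : 0 < L) :
    PySem.List.pyRange 0 L m = 0 :: (PySem.List.pyRange 0 (L - m) m).map (· + m) := by
  rw [PySem.List.pyRange_of_pos 0 L hm, PySem.List.pyRange_of_pos 0 (L - m) hm]
  simp only [sub_zero]
  by_cases h2 : 0 < L - m
  · have hn : ((L + m - 1) / m).toNat = ((L - m + m - 1) / m).toNat + 1 := by
      have h3 : (L + m - 1) / m = (L - m + m - 1) / m + 1 := by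
        have he : L + m - 1 = (L - m + m - 1) + 1 * m := by ring
        rw [he, Int.add_mul_ediv_right _ _ (by omega : m ≠ 0)]
      have h4 : 0 ≤ (L - m + m - 1) / m := Int.ediv_nonneg (by omega) (by omega)
      omega
    rw [if_pos hL, if_pos h2, hn, List.range_succ_eq_map]
    simp only [List.map_cons, List.map_map]
    congr 1
    · norm_num
    · apply List.map_congr_left
      intro k _
      simp only [Function.comp_apply]
      push_cast
      ring
  · have hz : (L - 1) / m = 0 := Int.ediv_eq_zero_of_lt (by omega) (by omega)
    have h1 : (L + m - 1) / m = 1 := by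
      have he : L + m - 1 = (L - 1) + 1 * m := by ring
      rw [he, Int.add_mul_ediv_right _ _ (by omega : m ≠ 0), hz]
      omega
    rw [if_pos hL, if_neg h2, h1]
    simp

-- shifting a slice past the first row = slicing the dropped suffix
theorem pv_slice_shift (s : List Char) (m i : Int) (hm : 0 < m) (hi : 0 ≤ i) :
    PySem.List.slice s (some (i + m)) (some (i + m + m))
      = PySem.List.slice (s.drop m.toNat) (some i) (some (i + m)) := by
  rw [PySem.List.slice_toNat s (by omega) (by omega),
      PySem.List.slice_toNat (s.drop m.toNat) (by omega) (by omega),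
      List.drop_drop]
  have e1 : (i + m + m).toNat - (i + m).toNat = (i + m).toNat - i.toNat := by omega
  have e2 : (i + m).toNat = m.toNat + i.toNat := by omega
  rw [e1, e2]

-- the heart: A's map over row starts equals B's head/tail recursion
theorem pv_main (c m : Int) (hm : 0 < m) : ∀ (s : List Char),
    (PySem.List.pyRange 0 (s.length : Int) m).map
        (fun i => PySem.List.pyGetD (PySem.List.slice s (some i) (some (i + m))) (c - 1) ' ')
      = altLoop c m hm s := by
  have H : ∀ (n : Nat) (s : List Char), s.length = n →
      (PySem.List.pyRange 0 (s.length : Int) m).map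
          (fun i => PySem.List.pyGetD (PySem.List.slice s (some i) (some (i + m))) (c - 1) ' ')
        = altLoop c m hm s := by
    intro n
    induction n using Nat.strong_induction_on with
    | _ n ih =>
      intro s hs
      match s with
      | [] => simp [altLoop, PySem.List.pyRange_of_pos 0 0 hm]
      | ch :: rest =>
        have hL : (0:Int) < ((ch :: rest).length : Int) := by
          simp only [List.length_cons]; push_cast; omega
        rw [pv_pyRange_cons_shift m _ hm hL, altLoop]
        simp only [List.map_cons, List.map_map]
        refine congrArg₂ _ ?_ ?_
        · -- the first row: slice from 0 is take
          rw [PySem.List.slice_zero_start, zero_add,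
            PySem.List.slice_to _ (by omega : (0:Int) ≤ m)]
        · -- the remaining rows
          by_cases hle : m ≤ ((ch :: rest).length : Int)
          · have hlen : (((ch :: rest).drop m.toNat).length : Int)
                = ((ch :: rest).length : Int) - m := by
              simp only [List.length_drop]
              omega
            have ihs := ih ((ch :: rest).drop m.toNat).length
              (by simp only [List.length_drop]; omega)
              ((ch :: rest).drop m.toNat) rfl
            rw [hlen] at ihs
            rw [← ihs]
            apply List.map_congr_left
            intro i hi
            have h0i : 0 ≤ i :=
              ((PySem.List.mem_pyRange_iff_of_pos hm i).mp hi).1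
            simp only [Function.comp_apply]
            rw [pv_slice_shift _ _ _ hm h0i]
          · -- the first row was the last one: both tails are empty
            have h2 : ¬ (0 < ((ch :: rest).length : Int) - m) := by omega
            have hdrop : (ch :: rest).drop m.toNat = [] := by
              apply List.drop_eq_nil_of_le
              omega
            rw [hdrop, altLoop]
            rw [PySem.List.pyRange_of_pos 0 _ hm, if_neg h2]
            simp
  intro s
  exact H s.length s rfl

-- ===== VERDICT (by name: the statement is the Claim_ definition above) =====
theorem solution_spec : Claim_equal_solution := by
  intro my_string m c _hdom hpre
  have hm0 : m ≠ 0 := hpre.1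
  unfold Spec_solution solution solution_alt
  rcases lt_or_gt_of_ne hm0 with hm | hm
  · have h1 : ¬ (0:Int) < m := by omega
    have h2 : ¬ ((my_string.length : Int) < 0) := by omega
    have hempty : PySem.List.pyRange 0 (my_string.toList.length : Int) m = [] := by
      simp [PySem.List.pyRange, hm0]
      rw [if_neg h1, if_neg h2]
    rw [dif_pos (by omega : m ≤ 0)]
    simp only [hempty, List.foldl_nil]
  · rw [dif_neg (by omega : ¬ m ≤ 0)]
    simp only [pv_foldl_app, List.nil_append, List.map_map]
    congr 1
    exact pv_main c m hm my_string.toList
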